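-- pv_equiv track=rewrite | github.com/ganadara135/CorridorRoad | freecad/Corridor_Road/objects/corridor_segment_builder.py | segment_ranges
-- ===== SOURCE A (Python) =====
-- def segment_ranges(count: int, boundaries):
--     total = int(count or 0)
--     if total < 2:
--         return []
--     idxs = sorted(set(int(i) for i in list(boundaries or []) if 0 < int(i) < total - 1))
--     if not idxs:
--         return [(0, total - 1)]
--     out = []
--     start = 0
--     for idx in idxs:
--         if idx - start >= 1:
--             out.append((int(start), int(idx)))
--         start = int(idx)
--     if (total - 1) - start >= 1:
--         out.append((int(start), int(total - 1)))
--     return out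
-- ===== SOURCE B (Python) =====
-- def _merge(a, b):
--     out = []
--     i = j = 0
--     while i < len(a) and j < len(b):
--         if a[i] < b[j]:
--             out.append(a[i]); i += 1
--         elif b[j] < a[i]:
--             out.append(b[j]); j += 1
--         else:
--             out.append(a[i]); i += 1; j += 1
--     out.extend(a[i:])
--     out.extend(b[j:])
--     return out
--
-- def _msort_unique(xs):
--     if len(xs) <= 1:
--         return xs
--     mid = len(xs) // 2
--     return _merge(_msort_unique(xs[:mid]), _msort_unique(xs[mid:]))
--
-- def segment_ranges(count: int, boundaries):
--     total = int(count or 0)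
--     if total < 2:
--         return []
--     vals = [int(i) for i in list(boundaries or []) if 0 < int(i) < total - 1]
--     out = []
--     start = 0
--     for v in _msort_unique(vals):
--         out.append((start, v))
--         start = v
--     out.append((start, total - 1))
--     return out
-- ===== Notes on version B (the rewrite author's own statement) =====
-- stated objective: alternative
-- what changed: Replaces set() plus builtin sorted() plus the guarded start-accumulator loop with special empty/end branches by a hand-written duplicate-dropping merge sort over the filtered boundaries and a plain unguarded sweep emitting one segment per point.
import Mathlib
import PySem

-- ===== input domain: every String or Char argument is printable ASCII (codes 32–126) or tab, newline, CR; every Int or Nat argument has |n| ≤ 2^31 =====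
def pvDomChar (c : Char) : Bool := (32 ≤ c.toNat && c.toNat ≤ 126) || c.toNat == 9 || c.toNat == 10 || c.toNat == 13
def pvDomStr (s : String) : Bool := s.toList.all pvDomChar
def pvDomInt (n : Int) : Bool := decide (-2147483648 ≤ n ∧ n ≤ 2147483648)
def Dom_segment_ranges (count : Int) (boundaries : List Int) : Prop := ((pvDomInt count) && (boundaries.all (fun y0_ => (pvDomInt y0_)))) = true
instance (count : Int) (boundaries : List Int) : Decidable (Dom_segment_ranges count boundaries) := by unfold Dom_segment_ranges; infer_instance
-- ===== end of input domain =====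

-- B replaces A's set()+builtin sorted()+guarded accumulator loop by a hand-written
-- duplicate-dropping merge sort over the filtered boundaries and a plain unguarded
-- sweep (alternative algorithm of the same cost; return value only).


-- ===== PORT A =====
def segment_ranges (count : Int) (boundaries : List Int) : List (Int × Int) :=
  let total := count        -- int(count or 0) = count for an int argument
  if total < 2 then []
  else
    let idxs := PySem.List.sorted
      (PySem.Set.ofList (boundaries.filter (fun i => decide (0 < i) && decide (i < total - 1))))
      (fun x => x) false
    if idxs = [] then [(0, total - 1)]
    else
      let p := idxs.foldl
        (fun (p : List (Int × Int) × Int) idx =>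
          (if idx - p.2 ≥ 1 then p.1 ++ [(p.2, idx)] else p.1, idx)) ([], 0)
      if (total - 1) - p.2 ≥ 1 then p.1 ++ [(p.2, total - 1)] else p.1

-- ===== PORT B =====
-- B's _merge: two-pointer while loop over a and b, as structural recursion on the
-- unread suffixes (duplicates across the two inputs emitted once)
def pvMerge : List Int → List Int → List Int
  | [], b => b
  | a, [] => a
  | x :: xs, y :: ys =>
    if x < y then x :: pvMerge xs (y :: ys)
    else if y < x then y :: pvMerge (x :: xs) ys
    else x :: pvMerge xs ys

-- B's _msort_unique: split at len//2, sort both halves, merge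
def pvMsortUnique (xs : List Int) : List Int :=
  if h : xs.length ≤ 1 then xs
  else
    let mid := xs.length / 2
    pvMerge (pvMsortUnique (xs.take mid)) (pvMsortUnique (xs.drop mid))
  termination_by xs.length
  decreasing_by
  · simp only [List.length_take]; omega
  · simp only [List.length_drop]; omega

def segment_ranges_alt (count : Int) (boundaries : List Int) : List (Int × Int) :=
  let total := count
  if total < 2 then []
  else
    let vals := boundaries.filter (fun i => decide (0 < i) && decide (i < total - 1))
    let p := (pvMsortUnique vals).foldl
      (fun (p : List (Int × Int) × Int) v => (p.1 ++ [(p.2, v)], v)) ([], 0)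
    p.1 ++ [(p.2, total - 1)]

-- ===== PRECONDITION & SPEC =====
def Spec_segment_ranges (count : Int) (boundaries : List Int) (out : List (Int × Int)) : Prop := out = segment_ranges_alt count boundaries
instance (count : Int) (boundaries : List Int) (out : List (Int × Int)) : Decidable (Spec_segment_ranges count boundaries out) := by unfold Spec_segment_ranges; infer_instance

-- ===== CLAIM (what is proved, stated in full; the proofs are below) =====
def Claim_equal_segment_ranges : Prop := ∀ (count : Int) (boundaries : List Int), Dom_segment_ranges count boundaries → Spec_segment_ranges count boundaries (segment_ranges count boundaries)

-- ===== LEMMAS AND PROOFS =====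

theorem mem_pvMerge (a b : List Int) (x : Int) :
    x ∈ pvMerge a b ↔ x ∈ a ∨ x ∈ b := by
  fun_induction pvMerge a b with
  | case1 b => simp
  | case2 a h => simp
  | case3 u us v vs huv ih => simp [ih]; tauto
  | case4 u us v vs huv hvu ih => simp [ih]; tauto
  | case5 u us v vs huv hvu ih =>
    have : u = v := by omega
    subst this
    simp [ih]; tauto

theorem pairwise_pvMerge (a b : List Int)
    (ha : a.Pairwise (· < ·)) (hb : b.Pairwise (· < ·)) :
    (pvMerge a b).Pairwise (· < ·) := by
  fun_induction pvMerge a b with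
  | case1 b => exact hb
  | case2 a h => exact ha
  | case3 u us v vs huv ih =>
    refine List.pairwise_cons.mpr ⟨?_, ih (List.pairwise_cons.mp ha).2 hb⟩
    intro z hz
    rcases (mem_pvMerge _ _ _).mp hz with h | h
    · exact (List.pairwise_cons.mp ha).1 z h
    · rcases List.mem_cons.mp h with rfl | h
      · exact huv
      · exact lt_trans huv ((List.pairwise_cons.mp hb).1 z h)
  | case4 u us v vs huv hvu ih =>
    refine List.pairwise_cons.mpr ⟨?_, ih ha (List.pairwise_cons.mp hb).2⟩
    intro z hz
    rcases (mem_pvMerge _ _ _).mp hz with h | h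
    · rcases List.mem_cons.mp h with rfl | h
      · exact hvu
      · exact lt_trans hvu ((List.pairwise_cons.mp ha).1 z h)
    · exact (List.pairwise_cons.mp hb).1 z h
  | case5 u us v vs huv hvu ih =>
    have huveq : u = v := by omega
    subst huveq
    refine List.pairwise_cons.mpr ⟨?_, ih (List.pairwise_cons.mp ha).2 (List.pairwise_cons.mp hb).2⟩
    intro z hz
    rcases (mem_pvMerge _ _ _).mp hz with h | h
    · exact (List.pairwise_cons.mp ha).1 z h
    · exact (List.pairwise_cons.mp hb).1 z h

theorem pvMsortUnique_spec (xs : List Int) :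
    (pvMsortUnique xs).Pairwise (· < ·) ∧ (∀ x, x ∈ pvMsortUnique xs ↔ x ∈ xs) := by
  fun_induction pvMsortUnique xs with
  | case1 xs h =>
    constructor
    · match xs, h with
      | [], _ => simp
      | [a], _ => simp
    · intro x; rfl
  | case2 xs h mid ih1 ih2 =>
    refine ⟨pairwise_pvMerge _ _ ih1.1 ih2.1, ?_⟩
    intro x
    rw [mem_pvMerge, ih1.2 x, ih2.2 x, ← List.mem_append, List.take_append_drop]

-- A's loop over a strictly increasing idxs list, started below its head and ended below `last`,
-- emits exactly the consecutive pairs of start :: idxs ++ [last].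
theorem segment_loop_eq (idxs : List Int) (start last : Int) (out : List (Int × Int))
    (hsorted : idxs.Pairwise (· < ·))
    (hmem : ∀ x ∈ idxs, start < x ∧ x < last) (hsl : start < last) :
    (let p := idxs.foldl
        (fun (p : List (Int × Int) × Int) idx =>
          (if idx - p.2 ≥ 1 then p.1 ++ [(p.2, idx)] else p.1, idx)) (out, start)
     if last - p.2 ≥ 1 then p.1 ++ [(p.2, last)] else p.1)
    = out ++ (start :: (idxs ++ [last])).zip (idxs ++ [last]) := by
  induction idxs generalizing start out with
  | nil => simp [List.foldl]; omega
  | cons a t ih =>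
    obtain ⟨hsa, hal⟩ := hmem a (by simp)
    have hguard : a - start ≥ 1 := by omega
    simp only [List.foldl, hguard, if_pos]
    rw [ih a (out ++ [(start, a)]) (by exact (List.pairwise_cons.mp hsorted).2)
        (fun x hx => ⟨(List.pairwise_cons.mp hsorted).1 x hx, (hmem x (by simp [hx])).2⟩) hal]
    simp [List.zip]

-- B's unconditional sweep over any idxs list (plus the final segment) emits
-- the consecutive pairs of start :: idxs ++ [last].
theorem segment_scan_eq (idxs : List Int) (start last : Int) (out : List (Int × Int)) :
    (let p := idxs.foldl
        (fun (p : List (Int × Int) × Int) i => (p.1 ++ [(p.2, i)], i)) (out, start)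
     p.1 ++ [(p.2, last)])
    = out ++ (start :: (idxs ++ [last])).zip (idxs ++ [last]) := by
  induction idxs generalizing start out with
  | nil => simp [List.foldl]
  | cons a t ih =>
    simp only [List.foldl]
    rw [ih a (out ++ [(start, a)])]
    simp [List.zip]

theorem segment_ranges_eq (count : Int) (boundaries : List Int) :
    segment_ranges count boundaries = segment_ranges_alt count boundaries := by
  unfold segment_ranges segment_ranges_alt
  by_cases h2 : count < 2
  · simp [h2]
  · simp only [h2, if_false]
    set flt := boundaries.filter (fun i => decide (0 < i) && decide (i < count - 1)) with hflt
    set marks := PySem.Set.ofList flt with hmarks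
    set idxs := PySem.List.sorted marks (fun x => x) false with hidxs
    have hsorted : idxs.Pairwise (· < ·) := PySem.List.sorted_ofList_pairwise_lt _
    have hmemmarks : ∀ x ∈ marks, 0 < x ∧ x < count - 1 := by
      intro x hx
      have := (PySem.Set.mem_ofList _ _).mp hx
      simp only [hflt, List.mem_filter, Bool.and_eq_true, decide_eq_true_eq] at this
      exact this.2
    have hmem : ∀ x ∈ idxs, 0 < x ∧ x < count - 1 := by
      intro x hx
      exact hmemmarks x ((PySem.List.mem_sorted _ _ _ _).mp hx)
    -- B's merge sort of the filtered list is exactly A's sorted set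
    have hms := pvMsortUnique_spec flt
    have hmsort : pvMsortUnique flt = idxs := by
      have hnodB : (pvMsortUnique flt).Nodup :=
        List.Pairwise.imp (fun h => ne_of_lt h) hms.1
      have hperm : (pvMsortUnique flt).Perm marks := by
        rw [List.perm_ext_iff_of_nodup hnodB (PySem.Set.nodup_ofList _)]
        intro x
        rw [hms.2 x]
        exact (PySem.Set.mem_ofList _ _).symm
      have hle : (pvMsortUnique flt).Pairwise (· ≤ ·) :=
        List.Pairwise.imp (fun h => le_of_lt h) hms.1
      rw [hidxs]
      exact (PySem.List.sorted_id_eq_of_perm_of_pairwise _ _ hperm hle).symm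
    rw [hmsort, segment_scan_eq idxs 0 (count - 1) []]
    by_cases he : idxs = []
    · simp [he]
    · simp only [he, if_false]
      have := segment_loop_eq idxs 0 (count - 1) [] hsorted
        (fun x hx => ⟨(hmem x hx).1, (hmem x hx).2⟩) (by omega)
      simp only [List.nil_append] at this ⊢
      exact this

-- ===== VERDICT (by name: the statement is the Claim_ definition above) =====
theorem segment_ranges_spec : Claim_equal_segment_ranges := by
  intro count boundaries _
  unfold Spec_segment_ranges
  exact segment_ranges_eq count boundaries
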